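-- pv_equiv track=rewrite | github.com/LeivaDiego/DLP-Laboratorio-F | src/scanner_generator/classes/yalex.py | _separate_header_and_trailer
-- ===== SOURCE A (Python) =====
-- def _separate_header_and_trailer(string: str):
--     # Separate the chunks based on '%%'
--     chunks = []
--     current_chunk = []
--     for line in string.split('\n'):  # Split the string into lines
--         if line.strip() == '%%':
--             chunks.append(''.join(current_chunk))
--             current_chunk = []
--         else:
--             current_chunk.append(line + '\n')  # Add the newline character back
--
--     # Add the last chunk
--     chunks.append(''.join(current_chunk))
--     return chunks
-- ===== SOURCE B (Python) =====
-- def _separate_header_and_trailer(string: str):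
--     # Build the chunk list back-to-front: walk the lines in reverse, starting a
--     # fresh empty chunk at each '%%' separator and prepending text lines to the
--     # current (front) chunk.
--     chunks = ['']
--     for line in reversed(string.split('\n')):
--         if line.strip() == '%%':
--             chunks.insert(0, '')
--         else:
--             chunks[0] = line + '\n' + chunks[0]
--     return chunks
-- ===== Notes on version B (the rewrite author's own statement) =====
-- stated objective: alternative
-- what changed: B builds the chunk list back-to-front in a single reversed pass that prepends each line directly onto the front chunk, instead of A's forward pass that accumulates a list of line fragments and joins it at every separator.
import Mathlib
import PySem

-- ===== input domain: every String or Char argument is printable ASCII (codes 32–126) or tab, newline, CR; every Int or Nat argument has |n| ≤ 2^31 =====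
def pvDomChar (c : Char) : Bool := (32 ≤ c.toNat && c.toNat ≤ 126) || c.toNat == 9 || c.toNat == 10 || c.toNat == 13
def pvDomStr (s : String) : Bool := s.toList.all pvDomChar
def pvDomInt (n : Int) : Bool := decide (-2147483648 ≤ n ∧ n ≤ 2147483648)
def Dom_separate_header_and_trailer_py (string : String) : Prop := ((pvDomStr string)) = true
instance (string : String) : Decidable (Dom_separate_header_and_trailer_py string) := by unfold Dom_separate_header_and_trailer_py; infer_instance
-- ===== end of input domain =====

-- B builds the chunk list back-to-front in one reversed pass, prepending lines onto the front chunk,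
-- instead of A's forward pass that accumulates fragments and joins them at each separator (objective: alternative).


-- ===== PORT A =====
-- A's loop body: state = (chunks, current_chunk); at a '%%' line flush ''.join(current_chunk), else append line+'\n'
def pvStepA (s : List (List Char) × List (List Char)) (line : List Char) :
    List (List Char) × List (List Char) :=
  if PySem.Chars.strip line == ['%', '%'] then
    (s.1 ++ [PySem.Chars.join [] s.2], [])
  else
    (s.1, s.2 ++ [line ++ ['\n']])

def separate_header_and_trailer_py (string : String) : List String :=
  ((((PySem.Chars.splitOn string.toList ['\n']).foldl pvStepA ([], [])).1 ++
    [PySem.Chars.join [] (((PySem.Chars.splitOn string.toList ['\n']).foldl pvStepA ([], [])).2)]).map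
    String.ofList)

-- ===== PORT B =====
-- B's loop body: at a '%%' line open a new empty front chunk, else prepend line+'\n' to the front chunk
def pvStepB (acc : List (List Char)) (line : List Char) : List (List Char) :=
  if PySem.Chars.strip line == ['%', '%'] then
    [] :: acc
  else
    match acc with
    | [] => []                        -- unreachable: acc starts nonempty and stays nonempty
    | h :: t => (line ++ '\n' :: h) :: t

def separate_header_and_trailer_py_alt (string : String) : List String :=
  (((PySem.Chars.splitOn string.toList ['\n']).reverse.foldl pvStepB [[]]).map String.ofList)

-- ===== PRECONDITION & SPEC =====
def Spec_separate_header_and_trailer_py (string : String) (out : List String) : Prop := out = separate_header_and_trailer_py_alt string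
instance (string : String) (out : List String) : Decidable (Spec_separate_header_and_trailer_py string out) := by unfold Spec_separate_header_and_trailer_py; infer_instance

-- ===== CLAIM (what is proved, stated in full; the proofs are below) =====
def Claim_equal_separate_header_and_trailer_py : Prop := ∀ (string : String), Dom_separate_header_and_trailer_py string → Spec_separate_header_and_trailer_py string (separate_header_and_trailer_py string)

-- ===== LEMMAS AND PROOFS =====

lemma pvJoinNil (xs : List (List Char)) : PySem.Chars.join [] xs = xs.flatten := by
  induction xs with
  | nil => simp [PySem.Chars.join, List.intercalate]
  | cons a t ih =>
    cases t with
    | nil => simp [PySem.Chars.join, List.intercalate]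
    | cons c d =>
      simp only [PySem.Chars.join, List.intercalate, List.intersperse, List.flatten] at ih ⊢
      simp [ih]

lemma pvStepA_pos (s : List (List Char) × List (List Char)) (l : List Char)
    (hp : (PySem.Chars.strip l == ['%', '%']) = true) :
    pvStepA s l = (s.1 ++ [PySem.Chars.join [] s.2], []) := by simp [pvStepA, hp]

lemma pvStepA_neg (s : List (List Char) × List (List Char)) (l : List Char)
    (hp : ¬ (PySem.Chars.strip l == ['%', '%']) = true) :
    pvStepA s l = (s.1, s.2 ++ [l ++ ['\n']]) := by simp [pvStepA, hp]

lemma pvStepB_pos (acc : List (List Char)) (l : List Char)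
    (hp : (PySem.Chars.strip l == ['%', '%']) = true) :
    pvStepB acc l = [] :: acc := by simp [pvStepB, hp]

lemma pvStepB_neg_cons (a : List Char) (b : List (List Char)) (l : List Char)
    (hp : ¬ (PySem.Chars.strip l == ['%', '%']) = true) :
    pvStepB (a :: b) l = (l ++ '\n' :: a) :: b := by simp [pvStepB, hp]

lemma pvFoldrB_ne_nil (lines : List (List Char)) :
    lines.foldr (fun x y => pvStepB y x) [[]] ≠ [] := by
  induction lines with
  | nil => simp
  | cons l ls ih =>
    simp only [List.foldr_cons]
    by_cases hp : (PySem.Chars.strip l == ['%', '%']) = true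
    · rw [pvStepB_pos _ _ hp]; simp
    · cases h : ls.foldr (fun x y => pvStepB y x) [[]] with
      | nil => exact absurd h ih
      | cons a b => rw [pvStepB_neg_cons _ _ _ hp]; simp

-- the loop invariant connecting A's forward fold to B's backward fold (as a foldr)
lemma pvLoop (lines : List (List Char)) (chunks cur : List (List Char)) :
    (lines.foldl pvStepA (chunks, cur)).1 ++
      [PySem.Chars.join [] (lines.foldl pvStepA (chunks, cur)).2] =
    chunks ++ (match lines.foldr (fun x y => pvStepB y x) [[]] with
               | [] => [PySem.Chars.join [] cur]
               | h :: t => (PySem.Chars.join [] cur ++ h) :: t) := by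
  induction lines generalizing chunks cur with
  | nil => simp
  | cons l ls ih =>
    simp only [List.foldl_cons, List.foldr_cons]
    by_cases hp : (PySem.Chars.strip l == ['%', '%']) = true
    · rw [pvStepA_pos _ _ hp, pvStepB_pos _ _ hp, ih]
      cases h : ls.foldr (fun x y => pvStepB y x) [[]] with
      | nil => exact absurd h (pvFoldrB_ne_nil ls)
      | cons a b => simp [pvJoinNil]
    · rw [pvStepA_neg _ _ hp, ih]
      cases h : ls.foldr (fun x y => pvStepB y x) [[]] with
      | nil => exact absurd h (pvFoldrB_ne_nil ls)
      | cons a b =>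
        rw [pvStepB_neg_cons _ _ _ hp]
        simp [pvJoinNil, List.append_assoc]

-- ===== VERDICT (by name: the statement is the Claim_ definition above) =====
theorem separate_header_and_trailer_py_spec : Claim_equal_separate_header_and_trailer_py := by
  intro s _
  unfold Spec_separate_header_and_trailer_py separate_header_and_trailer_py separate_header_and_trailer_py_alt
  rw [List.foldl_reverse, pvLoop]
  cases h : (PySem.Chars.splitOn s.toList ['\n']).foldr (fun x y => pvStepB y x) [[]] with
  | nil => exact absurd h (pvFoldrB_ne_nil _)
  | cons a b => simp
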